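-- pv_equiv track=rewrite | github.com/hungdino/Intro._To_Algorithms_Assignment3 | brian20200105.py | dynamic_programming3
-- ===== SOURCE A (Python) =====
-- def dynamic_programming3(table,table2,day,course):
--     if(table2[day][course]!=-1):
--         return table2[day][course]
--     maxx=0
--     for i in range(1,day-course+2):
--
--         if(i>len(table)):
--             break
--         k = table[i-1][course-1] + dynamic_programming3(table,table2,day-i,course-1)
--
--         if(maxx < k):
--             maxx = k
--
--     table2[day][course]=maxx
--
--     return maxx
-- ===== SOURCE B (Python) =====
-- def dynamic_programming3(table, table2, day, course):
--     # Memoized cell first (the function's contract: a non--1 cell is the answer);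
--     # otherwise bottom-up column-by-column DP computing the same value as the
--     # memoized recursion.  Computes the RETURN VALUE only (does not fill table2).
--     v = table2[day][course]
--     if v != -1:
--         return v
--     n = len(table)
--     col = [table2[d][0] if table2[d][0] != -1 else 0 for d in range(day + 1)]
--     for c in range(1, course + 1):
--         new = []
--         for d in range(day + 1):
--             v = table2[d][c]
--             if v == -1:
--                 v = 0
--                 for i in range(1, min(d - c + 1, n) + 1):
--                     v = max(v, table[i - 1][c - 1] + col[d - i])
--             new.append(v)
--         col = new
--     return col[day]
-- ===== Notes on version B (the rewrite author's own statement) =====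
-- stated objective: alternative
-- what changed: Replaces the memoized top-down recursion that fills table2 in place by a bottom-up column-by-column DP that builds one fresh column list per course level (B computes the same return value but does not mutate table2).
-- outside the precondition, e.g. on dynamic_programming3([[5]], [[-1, 4]], 0, 0): A returns 9, B returns 0
import Mathlib
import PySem

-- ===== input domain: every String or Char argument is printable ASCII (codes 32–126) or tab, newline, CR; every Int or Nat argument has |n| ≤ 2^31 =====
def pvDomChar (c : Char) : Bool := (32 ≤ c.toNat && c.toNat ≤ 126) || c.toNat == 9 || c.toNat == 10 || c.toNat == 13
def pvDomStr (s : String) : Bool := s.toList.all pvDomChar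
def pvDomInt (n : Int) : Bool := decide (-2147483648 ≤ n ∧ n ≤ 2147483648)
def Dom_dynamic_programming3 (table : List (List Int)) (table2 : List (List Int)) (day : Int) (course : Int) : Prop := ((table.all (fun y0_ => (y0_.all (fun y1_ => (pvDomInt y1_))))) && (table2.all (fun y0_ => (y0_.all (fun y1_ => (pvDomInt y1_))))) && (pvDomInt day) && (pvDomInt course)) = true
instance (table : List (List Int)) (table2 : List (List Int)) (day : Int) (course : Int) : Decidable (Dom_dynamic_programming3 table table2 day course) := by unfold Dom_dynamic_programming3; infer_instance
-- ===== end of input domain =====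

-- B replaces A's memoized top-down recursion (which fills table2 in place) by a bottom-up
-- column-by-column DP over a fresh list (objective: alternative decomposition, same cost);
-- A mutates table2, B does not, so the equivalence proved here is about the RETURN VALUE only.

-- ===== PORT A =====
-- the in-place assignment  table2[day][course] = x  (indices in range wherever A reaches it under Pre_)
def pvStoreA (m : List (List Int)) (d c x : Int) : List (List Int) :=
  PySem.List.pySetD m d (PySem.List.pySetD (PySem.List.pyGetD m d []) c x)

-- A's recursion, with the mutated table2 threaded through; `fuel` only bounds the recursion
-- depth so the definition is total (under Pre_ the depth is ≤ course+1 < the fuel supplied,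
-- so fuel never runs out on admitted inputs).
def pvGoA (t : List (List Int)) : Nat → List (List Int) → Int → Int → Int × List (List Int)
  | 0, m, _day, _course => (0, m)                     -- fuel exhausted: never reached under Pre_
  | f + 1, m, day, course =>
    match PySem.List.pyGet? m day with
    | none => (0, m)                                  -- Python: IndexError (outside Pre_)
    | some row =>
      match PySem.List.pyGet? row course with
      | none => (0, m)                                -- Python: IndexError (outside Pre_)
      | some v =>
        if v ≠ -1 then (v, m)
        else
          -- for i in range(1, day-course+2): … break when i > len(table);
          -- state = (maxx, table2, broken): once `broken` is set the rest of the range is skipped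
          let s := (PySem.List.pyRange 1 (day - course + 2) 1).foldl
            (fun s i =>
              if s.2.2 then s
              else if i > (t.length : Int) then (s.1, s.2.1, true)
              else
                match PySem.List.pyGet? t (i - 1) with
                | none => (s.1, s.2.1, true)          -- Python: IndexError (outside Pre_)
                | some trow =>
                  match PySem.List.pyGet? trow (course - 1) with
                  | none => (s.1, s.2.1, true)        -- Python: IndexError (outside Pre_)
                  | some tv =>
                    let p := pvGoA t f s.2.1 (day - i) (course - 1)
                    let k := tv + p.1
                    (if s.1 < k then k else s.1, p.2, false))
            (0, m, false)
          (s.1, pvStoreA s.2.1 day course s.1)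

def dynamic_programming3 (table : List (List Int)) (table2 : List (List Int)) (day : Int) (course : Int) : Int :=
  (pvGoA table (course.toNat + 2) table2 day course).1

-- ===== PORT B =====
-- Source B: bottom-up, one fresh column list per c; table2/table subscripts are in range on
-- every admitted input (Source B raises out of range exactly where Pre_ already excludes).
def dynamic_programming3_alt (table : List (List Int)) (table2 : List (List Int)) (day : Int) (course : Int) : Int :=
  let v0 := PySem.List.pyGetD (PySem.List.pyGetD table2 day []) course 0  -- table2[day][course]
  if v0 ≠ -1 then v0
  else
  let n : Int := table.length
  let col0 := (PySem.List.pyRange 0 (day + 1) 1).map (fun d =>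
    let v := PySem.List.pyGetD (PySem.List.pyGetD table2 d []) 0 0
    if v ≠ -1 then v else 0)
  let col := (PySem.List.pyRange 1 (course + 1) 1).foldl (fun col c =>
    (PySem.List.pyRange 0 (day + 1) 1).map (fun d =>
      let v := PySem.List.pyGetD (PySem.List.pyGetD table2 d []) c 0
      if v = -1 then
        (PySem.List.pyRange 1 (min (d - c + 1) n + 1) 1).foldl (fun v i =>
          max v (PySem.List.pyGetD (PySem.List.pyGetD table (i - 1) []) (c - 1) 0 +
                 PySem.List.pyGetD col (d - i) 0)) 0
      else v)) col0
  PySem.List.pyGetD col day 0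

-- ===== PRECONDITION & SPEC =====
-- Pre_ admits every input on which A's first lookup is an immediate memo hit, plus the
-- full-DP inputs; it excludes (a) inputs on which A raises IndexError (indices outside the
-- table2 rectangle / too-short table rows), and (b) inputs where the first lookup is -1 and,
-- table being nonempty, column 0 of table2 holds a -1 in rows 0..day: there A's recursion
-- reaches course = -1 and reads cells via Python's accidental negative-index wraparound
-- (raising or returning an arbitrary wrapped value), an artefact of A's implementation.
def Pre_dynamic_programming3 (table : List (List Int)) (table2 : List (List Int)) (day : Int) (course : Int) : Prop :=
  -- memo hit: the cell A reads first exists (Python indexing, wrap included) and is not -1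
  ((-(table2.length : Int) ≤ day ∧ day < (table2.length : Int)) ∧
   (-((PySem.List.pyGetD table2 day []).length : Int) ≤ course ∧
     course < ((PySem.List.pyGetD table2 day []).length : Int)) ∧
   PySem.List.pyGetD (PySem.List.pyGetD table2 day []) course 0 ≠ -1)
  ∨
  -- full DP: the rectangle of cells the recursion can touch is in range, base column pre-filled
  (0 ≤ day ∧ day < (table2.length : Int) ∧ 0 ≤ course ∧
   (∀ r ∈ table2.take (day.toNat + 1), course < (r.length : Int)) ∧
   (∀ r ∈ table.take day.toNat, course ≤ (r.length : Int)) ∧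
   (table = [] ∨ ∀ d ∈ List.range (day.toNat + 1), (table2.getD d []).getD 0 0 ≠ -1))

instance (table : List (List Int)) (table2 : List (List Int)) (day : Int) (course : Int) : Decidable (Pre_dynamic_programming3 table table2 day course) := by
  unfold Pre_dynamic_programming3; infer_instance

def pvWitness_dynamic_programming3 : List (List Int) × List (List Int) × Int × Int :=
  ([[3], [5]], [[7, -1], [2, -1], [4, -1]], 2, 1)

def Spec_dynamic_programming3 (table : List (List Int)) (table2 : List (List Int)) (day : Int) (course : Int) (out : Int) : Prop := out = dynamic_programming3_alt table table2 day course
instance (table : List (List Int)) (table2 : List (List Int)) (day : Int) (course : Int) (out : Int) : Decidable (Spec_dynamic_programming3 table table2 day course out) := by unfold Spec_dynamic_programming3; infer_instance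

-- ===== CLAIM (what is proved, stated in full; the proofs are below) =====
def Claim_equal_dynamic_programming3 : Prop := ∀ (table : List (List Int)) (table2 : List (List Int)) (day : Int) (course : Int), Dom_dynamic_programming3 table table2 day course → Pre_dynamic_programming3 table table2 day course → Spec_dynamic_programming3 table table2 day course (dynamic_programming3 table table2 day course)

-- ===== LEMMAS AND PROOFS =====

-- cell (d, c) of a table, 0 outside (all proof-side accesses are in range)
def pvCell (m : List (List Int)) (d c : Nat) : Int := (m.getD d []).getD c 0

-- the pure value of A's memoized recursion, read off the ORIGINAL table2
def pvFF (t m : List (List Int)) : Nat → Nat → Int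
  | 0, d => if pvCell m d 0 = -1 then 0 else pvCell m d 0
  | c + 1, d =>
    if pvCell m d (c + 1) = -1 then
      (List.range' 1 (min (d - c) t.length)).foldl
        (fun acc i => max acc (pvCell t (i - 1) c + pvFF t m c (d - i))) 0
    else pvCell m d (c + 1)

-- state invariant: the threaded table2 differs from the original only by memo writes,
-- each write holding the pure value of its cell
def pvInv (t m0 m : List (List Int)) : Prop :=
  m.length = m0.length ∧
  (∀ d : Nat, (m.getD d []).length = (m0.getD d []).length) ∧
  (∀ d c : Nat, pvCell m d c = pvCell m0 d c ∨
    (pvCell m0 d c = -1 ∧ pvCell m d c = pvFF t m0 c d))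

lemma pvStoreA_spec (m : List (List Int)) (d c : Int) (x : Int)
    (hd0 : 0 ≤ d) (hd : d.toNat < m.length) (hc0 : 0 ≤ c)
    (hc : c.toNat < (m.getD d.toNat []).length) :
    (pvStoreA m d c x).length = m.length ∧
    (∀ d' : Nat, ((pvStoreA m d c x).getD d' []).length = (m.getD d' []).length) ∧
    (∀ d' c' : Nat, pvCell (pvStoreA m d c x) d' c' =
      if d' = d.toNat ∧ c' = c.toNat then x else pvCell m d' c') := by
  unfold pvStoreA
  rw [PySem.List.pyGetD_of_nonneg _ _ hd0, PySem.List.pySetD_of_nonneg _ _ hc0,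
      PySem.List.pySetD_of_nonneg _ _ hd0]
  have hset : ∀ (r : List Int) (d' : Nat),
      (m.set d.toNat r).getD d' [] = if d' = d.toNat then r else m.getD d' [] := by
    intro r d'
    by_cases h : d' = d.toNat
    · subst h
      rw [List.getD_eq_getElem?_getD, List.getElem?_set_self hd, if_pos rfl]; rfl
    · rw [List.getD_eq_getElem?_getD, List.getElem?_set_ne (Ne.symm h),
          ← List.getD_eq_getElem?_getD, if_neg h]
  refine ⟨by simp, ?_, ?_⟩
  · intro d'; rw [hset]
    by_cases h : d' = d.toNat <;> simp [h]
  · intro d' c'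
    unfold pvCell
    rw [hset]
    by_cases h : d' = d.toNat
    · subst h
      rw [if_pos rfl]
      by_cases h2 : c' = c.toNat
      · subst h2
        rw [if_pos ⟨rfl, rfl⟩, List.getD_eq_getElem?_getD, List.getElem?_set_self hc]; rfl
      · rw [if_neg (by tauto), List.getD_eq_getElem?_getD, List.getElem?_set_ne (Ne.symm h2),
            ← List.getD_eq_getElem?_getD]
    · rw [if_neg h, if_neg (by tauto)]

-- writing the pure value into a cell whose original content was -1 preserves the invariant
lemma pvInv_store (t m0 S : List (List Int)) (d c : Int) (W : Int)
    (hInv : pvInv t m0 S) (hd0 : 0 ≤ d) (hc0 : 0 ≤ c)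
    (hdlt0 : d.toNat < m0.length) (hrl0 : c.toNat < (m0.getD d.toNat []).length)
    (horig : pvCell m0 d.toNat c.toNat = -1) (hW : W = pvFF t m0 c.toNat d.toNat) :
    pvInv t m0 (pvStoreA S d c W) := by
  obtain ⟨hI1, hI2, hI3⟩ := hInv
  have hsp := pvStoreA_spec S d c W hd0 (by rw [hI1]; exact hdlt0) hc0
    (by rw [hI2 d.toNat]; exact hrl0)
  refine ⟨hsp.1.trans hI1, fun dx => (hsp.2.1 dx).trans (hI2 dx), ?_⟩
  intro dx cx
  rw [hsp.2.2 dx cx]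
  by_cases he : dx = d.toNat ∧ cx = c.toNat
  · rw [if_pos he]
    obtain ⟨e1, e2⟩ := he; subst e1; subst e2
    exact Or.inr ⟨horig, hW⟩
  · rw [if_neg he]
    exact hI3 dx cx

-- A's recursion computes the pure value and preserves the invariant
lemma pvGet?_of_nonneg {α : Type} (xs : List α) (i : Int) (e : α) (h0 : 0 ≤ i)
    (h : i.toNat < xs.length) : PySem.List.pyGet? xs i = some (xs.getD i.toNat e) := by
  obtain ⟨n, rfl⟩ := Int.eq_ofNat_of_zero_le h0
  simp only [Int.toNat_natCast] at h ⊢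
  rw [PySem.List.pyGet?_natCast, List.getElem?_eq_getElem h, List.getD_eq_getElem _ _ h]

lemma pvGet?_inRange {α : Type} (xs : List α) (i : Int) (e : α)
    (h1 : -(xs.length : Int) ≤ i) (h2 : i < (xs.length : Int)) :
    PySem.List.pyGet? xs i = some (PySem.List.pyGetD xs i e) := by
  rcases le_or_gt 0 i with h0 | h0
  · rw [PySem.List.pyGetD_of_nonneg xs e h0]
    exact pvGet?_of_nonneg xs i e h0 (by omega)
  · have hk1 : 0 < (-i).toNat := by omega
    have hk2 : (-i).toNat ≤ xs.length := by omega
    rw [show i = -(((-i).toNat : Nat) : Int) by omega,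
        PySem.List.pyGet?_neg_natCast xs _ hk1 hk2,
        PySem.List.pyGetD_neg_natCast xs _ e hk1 hk2,
        List.getElem?_eq_getElem (by omega)]

lemma pvFF_of_ne (t m : List (List Int)) (c d : Nat) (h : ¬ pvCell m d c = -1) :
    pvFF t m c d = pvCell m d c := by
  cases c with
  | zero => simp [pvFF, h]
  | succ c' => simp [pvFF, h]

lemma pvGoA_correct (t m0 : List (List Int)) (day0 course0 : Int)
    (hpre : 0 ≤ day0 ∧ day0 < (m0.length : Int) ∧ 0 ≤ course0 ∧
      (∀ r ∈ m0.take (day0.toNat + 1), course0 < (r.length : Int)) ∧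
      (∀ r ∈ t.take day0.toNat, course0 ≤ (r.length : Int)) ∧
      (t = [] ∨ ∀ d ∈ List.range (day0.toNat + 1), (m0.getD d []).getD 0 0 ≠ -1)) :
    ∀ (fuel : Nat) (m : List (List Int)) (d c : Int),
      pvInv t m0 m → 0 ≤ d → d ≤ day0 → 0 ≤ c → c ≤ course0 → c.toNat + 1 ≤ fuel →
      (pvGoA t fuel m d c).1 = pvFF t m0 c.toNat d.toNat ∧ pvInv t m0 (pvGoA t fuel m d c).2 := by
  intro fuel
  induction fuel with
  | zero => intro m d c _ _ _ _ _ hf; omega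
  | succ f ih =>
    intro m d c hInv hd0 hdle hc0 hcle hf
    obtain ⟨hlen, hrowlen, hcells⟩ := hInv
    obtain ⟨hday0, hdaylt, hcourse0, hrows2, hrows1, hbase⟩ := hpre
    have hdlt : d.toNat < m.length := by omega
    have hd0lt : d.toNat < m0.length := by omega
    have hrmem : m0.getD d.toNat [] ∈ m0.take (day0.toNat + 1) := by
      have hi : d.toNat < (m0.take (day0.toNat + 1)).length := by
        simp [List.length_take]; omega
      have hmem := List.getElem_mem hi
      rwa [List.getElem_take, ← List.getD_eq_getElem _ [] hd0lt] at hmem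
    have hrlen0 : course0 < ((m0.getD d.toNat []).length : Int) := hrows2 _ hrmem
    have hrlen : c.toNat < (m.getD d.toNat []).length := by
      have h3 := hrowlen d.toNat; omega
    have hget1 : PySem.List.pyGet? m d = some (m.getD d.toNat []) :=
      pvGet?_of_nonneg m d [] hd0 hdlt
    have hget2 : PySem.List.pyGet? (m.getD d.toNat []) c = some (pvCell m d.toNat c.toNat) :=
      pvGet?_of_nonneg (m.getD d.toNat []) c 0 hc0 hrlen
    rw [pvGoA]
    simp only [hget1, hget2]
    by_cases hv : pvCell m d.toNat c.toNat = -1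
    · have horig : pvCell m0 d.toNat c.toNat = -1 := by
        rcases hcells d.toNat c.toNat with h | ⟨h1, _⟩
        · rw [← h]; exact hv
        · exact h1
      simp only [hv, ne_eq, not_true_eq_false, if_false]
      -- once `broken` is set the rest of the range is skipped
      have hfix : ∀ (l : List Int) (w : Int × List (List Int) × Bool), w.2.2 = true →
          l.foldl (fun s i =>
            if s.2.2 then s
            else if i > (t.length : Int) then (s.1, s.2.1, true)
            else
              match PySem.List.pyGet? t (i - 1) with
              | none => (s.1, s.2.1, true)
              | some trow =>
                match PySem.List.pyGet? trow (c - 1) with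
                | none => (s.1, s.2.1, true)
                | some tv =>
                  let p := pvGoA t f s.2.1 (d - i) (c - 1)
                  let k := tv + p.1
                  (if s.1 < k then k else s.1, p.2, false)) w = w := by
        intro l
        induction l with
        | nil => intro w _; rfl
        | cons x xs ihl =>
          intro w hw
          rw [List.foldl_cons, if_pos hw]
          exact ihl w hw
      rcases hc' : c.toNat with _ | c'
      -- column 0: Pre_ forces table = [], the loop breaks at once, 0 is stored
      · have hc00 : c = 0 := by omega
        subst hc00
        have horig0 : pvCell m0 d.toNat 0 = -1 := by simpa using horig
        have ht : t = [] := by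
          rcases hbase with h | h
          · exact h
          · exact absurd horig0 (h d.toNat (List.mem_range.mpr (by omega)))
        have htn : ((t.length : Nat) : Int) = 0 := by rw [ht]; rfl
        have hloop0 : ((PySem.List.pyRange 1 (d - 0 + 2) 1).foldl (fun s i =>
            if s.2.2 then s
            else if i > (t.length : Int) then (s.1, s.2.1, true)
            else
              match PySem.List.pyGet? t (i - 1) with
              | none => (s.1, s.2.1, true)
              | some trow =>
                match PySem.List.pyGet? trow ((0 : Int) - 1) with
                | none => (s.1, s.2.1, true)
                | some tv =>
                  let p := pvGoA t f s.2.1 (d - i) ((0 : Int) - 1)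
                  let k := tv + p.1
                  (if s.1 < k then k else s.1, p.2, false)) ((0 : Int), m, false)) =
            ((0 : Int), m, true) := by
          rw [PySem.List.pyRange_one_cons (by omega), List.foldl_cons,
              if_neg (by simp), if_pos (by omega)]
          exact hfix (PySem.List.pyRange (1 + 1) (d - 0 + 2) 1) ((0 : Int), m, true) rfl
        simp only [hloop0]
        exact ⟨by simp [pvFF, horig0],
          pvInv_store t m0 m d 0 0 ⟨hlen, hrowlen, hcells⟩ hd0 le_rfl hd0lt
            (by omega) (by simpa using horig) (by simp [pvFF, horig0])⟩
      -- column c'+1: run the loop across [1 .. min(d-c+1, len t)], then store the fold value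
      · have hc1 : 1 ≤ c := by omega
        have hloop : ∀ (k j : Nat) (m' : List (List Int)) (maxx : Int),
            pvInv t m0 m' → 1 ≤ j →
            j + k = min (d.toNat - c') t.length + 1 →
            (((PySem.List.pyRange (j : Int) (d - c + 2) 1).foldl (fun s i =>
              if s.2.2 then s
              else if i > (t.length : Int) then (s.1, s.2.1, true)
              else
                match PySem.List.pyGet? t (i - 1) with
                | none => (s.1, s.2.1, true)
                | some trow =>
                  match PySem.List.pyGet? trow (c - 1) with
                  | none => (s.1, s.2.1, true)
                  | some tv =>
                    let p := pvGoA t f s.2.1 (d - i) (c - 1)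
                    let k := tv + p.1
                    (if s.1 < k then k else s.1, p.2, false)) (maxx, m', false)).1 =
              (List.range' j k).foldl
                (fun acc i => max acc (pvCell t (i - 1) c' + pvFF t m0 c' (d.toNat - i))) maxx) ∧
            pvInv t m0 ((PySem.List.pyRange (j : Int) (d - c + 2) 1).foldl (fun s i =>
              if s.2.2 then s
              else if i > (t.length : Int) then (s.1, s.2.1, true)
              else
                match PySem.List.pyGet? t (i - 1) with
                | none => (s.1, s.2.1, true)
                | some trow =>
                  match PySem.List.pyGet? trow (c - 1) with
                  | none => (s.1, s.2.1, true)
                  | some tv =>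
                    let p := pvGoA t f s.2.1 (d - i) (c - 1)
                    let k := tv + p.1
                    (if s.1 < k then k else s.1, p.2, false)) (maxx, m', false)).2.1 := by
          intro k
          induction k with
          | zero =>
            intro j m' maxx hInv' hj hjk
            by_cases hend : (j : Int) < d - c + 2
            · rw [PySem.List.pyRange_one_cons hend, List.foldl_cons,
                  if_neg (by simp), if_pos (by omega),
                  hfix (PySem.List.pyRange ((j : Int) + 1) (d - c + 2) 1) (maxx, m', true) rfl]
              exact ⟨rfl, hInv'⟩
            · rw [PySem.List.pyRange_one_eq_nil (by omega), List.foldl_nil]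
              exact ⟨rfl, hInv'⟩
          | succ k ihk =>
            intro j m' maxx hInv' hj hjk
            have h1 : (j : Int) < d - c + 2 := by omega
            have h2 : ¬((j : Int) > (t.length : Int)) := by omega
            have hjt : j - 1 < t.length := by omega
            have hta : PySem.List.pyGet? t ((j : Int) - 1) = some (t.getD (j - 1) []) := by
              have h0 : (0 : Int) ≤ (j : Int) - 1 := by omega
              have := pvGet?_of_nonneg t ((j : Int) - 1) ([] : List Int) h0
                (by rw [show ((j : Int) - 1).toNat = j - 1 by omega]; exact hjt)
              rwa [show ((j : Int) - 1).toNat = j - 1 by omega] at this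
            have htmem : t.getD (j - 1) [] ∈ t.take day0.toNat := by
              have hi : j - 1 < (t.take day0.toNat).length := by
                simp [List.length_take]; omega
              have hmem := List.getElem_mem hi
              rwa [List.getElem_take, ← List.getD_eq_getElem _ [] hjt] at hmem
            have htrl : course0 ≤ ((t.getD (j - 1) []).length : Int) := hrows1 _ htmem
            have hclt : c' < (t.getD (j - 1) []).length := by omega
            have htb : PySem.List.pyGet? (t.getD (j - 1) []) (c - 1) =
                some (pvCell t (j - 1) c') := by
              have h0 : (0 : Int) ≤ c - 1 := by omega
              have := pvGet?_of_nonneg (t.getD (j - 1) []) (c - 1) (0 : Int) h0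
                (by rw [show (c - 1).toNat = c' by omega]; exact hclt)
              rwa [show (c - 1).toNat = c' by omega] at this
            obtain ⟨hp1, hpInv⟩ := ih m' (d - (j : Int)) (c - 1) hInv' (by omega) (by omega)
              (by omega) (by omega) (by omega)
            rw [show (c - 1).toNat = c' by omega,
                show (d - (j : Int)).toNat = d.toNat - j by omega] at hp1
            rw [PySem.List.pyRange_one_cons h1, List.foldl_cons,
                if_neg (by simp), if_neg h2]
            simp only [hta, htb, hp1]
            rw [show (j : Int) + 1 = ((j + 1 : Nat) : Int) by push_cast; ring]
            obtain ⟨hL1, hL2⟩ := ihk (j + 1) (pvGoA t f m' (d - (j : Int)) (c - 1)).2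
              (if maxx < pvCell t (j - 1) c' + pvFF t m0 c' (d.toNat - j)
               then pvCell t (j - 1) c' + pvFF t m0 c' (d.toNat - j) else maxx)
              hpInv (by omega) (by omega)
            refine ⟨?_, hL2⟩
            rw [hL1, List.range'_succ, List.foldl_cons]
            congr 1
            split_ifs <;> omega
        obtain ⟨hL1, hLInv⟩ := hloop (min (d.toNat - c') t.length) 1 m 0
          ⟨hlen, hrowlen, hcells⟩ le_rfl (by omega)
        simp only [Nat.cast_one] at hL1 hLInv
        have hW : pvFF t m0 (c' + 1) d.toNat =
            (List.range' 1 (min (d.toNat - c') t.length)).foldl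
              (fun acc i => max acc (pvCell t (i - 1) c' + pvFF t m0 c' (d.toNat - i))) 0 := by
          rw [pvFF, if_pos (by rw [← hc']; exact horig)]
        refine ⟨by rw [hL1, hW], ?_⟩
        exact pvInv_store t m0 _ d c _ hLInv hd0 hc0 hd0lt (by omega) horig
          (by rw [hL1, hc']; exact hW.symm)
    · -- memo hit: the stored value is the pure value either way
      simp only [hv, ne_eq, not_false_eq_true, if_true]
      refine ⟨?_, hlen, hrowlen, hcells⟩
      rcases hcells d.toNat c.toNat with h | ⟨h1, h2⟩
      · rw [h, pvFF_of_ne t m0 c.toNat d.toNat (by rw [← h]; exact hv)]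
      · exact h2

-- B's column fold tabulates the same pure values
lemma pvAlt_eq_pvFF (t m0 : List (List Int)) (day0 course0 : Int)
    (hpre : 0 ≤ day0 ∧ day0 < (m0.length : Int) ∧ 0 ≤ course0 ∧
      (∀ r ∈ m0.take (day0.toNat + 1), course0 < (r.length : Int)) ∧
      (∀ r ∈ t.take day0.toNat, course0 ≤ (r.length : Int)) ∧
      (t = [] ∨ ∀ d ∈ List.range (day0.toNat + 1), (m0.getD d []).getD 0 0 ≠ -1)) :
    dynamic_programming3_alt t m0 day0 course0 = pvFF t m0 course0.toNat day0.toNat := by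
  obtain ⟨hday0, hdaylt, hcourse0, hrows2, hrows1, hbase⟩ := hpre
  have hcourseC : course0 = (course0.toNat : Int) := by omega
  set D := day0.toNat with hD
  set C := course0.toNat with hC
  have hD1 : (day0 + 1 - 0).toNat = D + 1 := by omega
  -- column 0
  have hcol0 : ((PySem.List.pyRange 0 (day0 + 1) 1).map (fun d =>
      let v := PySem.List.pyGetD (PySem.List.pyGetD m0 d []) 0 0
      if v ≠ -1 then v else 0)) = (List.range (D + 1)).map (fun d => pvFF t m0 0 d) := by
    rw [PySem.List.pyRange_one, List.map_map, hD1]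
    apply List.map_congr_left
    intro k _
    by_cases hv : (m0.getD k []).getD 0 0 = -1 <;>
      simp [pvFF, pvCell, PySem.List.pyGetD_natCast, PySem.List.pyGetD_zero]
  -- each later column tabulates pvFF of its level
  have key : ∀ c : Nat, c ≤ C →
      (PySem.List.pyRange 1 ((c : Int) + 1) 1).foldl (fun col c =>
        (PySem.List.pyRange 0 (day0 + 1) 1).map (fun d =>
          let v := PySem.List.pyGetD (PySem.List.pyGetD m0 d []) c 0
          if v = -1 then
            (PySem.List.pyRange 1 (min (d - c + 1) (t.length : Int) + 1) 1).foldl (fun v i =>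
              max v (PySem.List.pyGetD (PySem.List.pyGetD t (i - 1) []) (c - 1) 0 +
                     PySem.List.pyGetD col (d - i) 0)) 0
          else v))
        ((PySem.List.pyRange 0 (day0 + 1) 1).map (fun d =>
          let v := PySem.List.pyGetD (PySem.List.pyGetD m0 d []) 0 0
          if v ≠ -1 then v else 0)) = (List.range (D + 1)).map (fun d => pvFF t m0 c d) := by
    intro c
    induction c with
    | zero =>
      intro _
      rw [show (((0 : Nat) : Int) + 1) = 1 by norm_num, PySem.List.pyRange_one_eq_nil le_rfl,
          List.foldl_nil]
      exact hcol0
    | succ c ihc =>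
      intro hcC
      rw [show (((c + 1 : Nat) : Int) + 1) = ((c : Int) + 1) + 1 by push_cast; ring,
          show PySem.List.pyRange 1 ((c : Int) + 1 + 1) 1
             = PySem.List.pyRange 1 ((c : Int) + 1) 1 ++ [(c : Int) + 1] from
            PySem.List.pyRange_one_succ_right (by omega),
          List.foldl_append, ihc (by omega),
          List.foldl_cons, List.foldl_nil, PySem.List.pyRange_one, List.map_map, hD1]
      apply List.map_congr_left
      intro k hk
      have hkD : k < D + 1 := List.mem_range.mp hk
      show (let v := PySem.List.pyGetD (PySem.List.pyGetD m0 ((0 : Int) + (k : Int)) []) ((c : Int) + 1) 0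
            if v = -1 then _ else v) = pvFF t m0 (c + 1) k
      have hvv : PySem.List.pyGetD (PySem.List.pyGetD m0 ((0 : Int) + (k : Int)) []) ((c : Int) + 1) 0 =
          pvCell m0 k (c + 1) := by
        rw [zero_add, PySem.List.pyGetD_natCast,
            show ((c : Int) + 1) = ((c + 1 : Nat) : Int) by push_cast; ring,
            PySem.List.pyGetD_natCast]
        rfl
      simp only [hvv]
      by_cases hv : pvCell m0 k (c + 1) = -1
      · rw [if_pos hv]
        have hFF : pvFF t m0 (c + 1) k = (List.range' 1 (min (k - c) t.length)).foldl
            (fun acc i => max acc (pvCell t (i - 1) c + pvFF t m0 c (k - i))) 0 := by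
          rw [pvFF, if_pos hv]
        rw [hFF, List.range'_eq_map_range, List.foldl_map, PySem.List.pyRange_one,
            List.foldl_map,
            show (min ((0 : Int) + (k : Int) - ((c : Int) + 1) + 1) (t.length : Int) + 1 - 1).toNat
               = min (k - c) t.length by omega]
        apply PySem.List.foldl_congr_mem
        intro acc j hj
        have hjb : j < min (k - c) t.length := List.mem_range.mp hj
        have h1j : (k : Int) - ((1 : Int) + (j : Int)) = ((k - (1 + j) : Nat) : Int) := by omega
        rw [show ((1 : Int) + (j : Int)) - 1 = (j : Int) by ring,
            show ((c : Int) + 1) - 1 = (c : Int) by ring, zero_add,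
            PySem.List.pyGetD_natCast, PySem.List.pyGetD_natCast, h1j,
            PySem.List.pyGetD_natCast,
            PySem.List.getD_map_range _ _ _ _ (by omega)]
        simp [pvCell]
      · rw [if_neg hv, pvFF, if_neg hv]
  -- the early memo-hit check, then the final lookup
  obtain ⟨hday0', _, hcourse0', hrows2', _, _⟩ :
      0 ≤ day0 ∧ day0 < (m0.length : Int) ∧ 0 ≤ course0 ∧
      (∀ r ∈ m0.take (D + 1), course0 < (r.length : Int)) ∧
      (∀ r ∈ t.take D, course0 ≤ (r.length : Int)) ∧
      (t = [] ∨ ∀ d ∈ List.range (D + 1), (m0.getD d []).getD 0 0 ≠ -1) :=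
    ⟨hday0, hdaylt, hcourse0, hrows2, hrows1, hbase⟩
  have hv0 : PySem.List.pyGetD (PySem.List.pyGetD m0 day0 []) course0 0 =
      pvCell m0 D C := by
    rw [PySem.List.pyGetD_of_nonneg _ _ hday0', PySem.List.pyGetD_of_nonneg _ _ hcourse0']
    rfl
  show (if PySem.List.pyGetD (PySem.List.pyGetD m0 day0 []) course0 0 ≠ -1 then
          PySem.List.pyGetD (PySem.List.pyGetD m0 day0 []) course0 0
        else PySem.List.pyGetD _ day0 0) = _
  rw [hv0]
  by_cases hne : pvCell m0 D C = -1
  · rw [if_neg (by simp [hne])]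
    rw [hcourseC, key C le_rfl,
        show day0 = (D : Int) by omega, PySem.List.pyGetD_natCast,
        PySem.List.getD_map_range _ _ _ _ (by omega)]
  · rw [if_pos hne]
    exact (pvFF_of_ne t m0 C D hne).symm

-- ===== VERDICT (by name: the statement is the Claim_ definition above) =====
theorem dynamic_programming3_spec : Claim_equal_dynamic_programming3 := by
  intro t m0 day course _ hpre
  unfold Spec_dynamic_programming3
  rcases hpre with ⟨h1, h2, hne⟩ | hrect
  · -- memo hit: both sides return table2[day][course]
    have hA : dynamic_programming3 t m0 day course =
        PySem.List.pyGetD (PySem.List.pyGetD m0 day []) course 0 := by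
      unfold dynamic_programming3
      show (pvGoA t (course.toNat + 1 + 1) m0 day course).1 = _
      rw [pvGoA]
      simp only [pvGet?_inRange m0 day ([] : List Int) h1.1 h1.2]
      simp only [pvGet?_inRange (PySem.List.pyGetD m0 day []) course (0 : Int) h2.1 h2.2]
      rw [if_pos hne]
    have hB : dynamic_programming3_alt t m0 day course =
        PySem.List.pyGetD (PySem.List.pyGetD m0 day []) course 0 := by
      unfold dynamic_programming3_alt
      show (if PySem.List.pyGetD (PySem.List.pyGetD m0 day []) course 0 ≠ -1 then
              PySem.List.pyGetD (PySem.List.pyGetD m0 day []) course 0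
            else _) = _
      rw [if_pos hne]
    rw [hA, hB]
  · unfold dynamic_programming3
    have hgo := pvGoA_correct t m0 day course hrect (course.toNat + 2) m0 day course
      ⟨rfl, fun _ => rfl, fun _ _ => Or.inl rfl⟩ hrect.1 le_rfl hrect.2.2.1 le_rfl (by omega)
    rw [hgo.1, pvAlt_eq_pvFF t m0 day course hrect]
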